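-- pv_equiv track=rewrite | github.com/yiy70070/DARE | core/analyzer/pooling_error_analyzer.py | _get_receptive_indices
-- ===== SOURCE A (Python) =====
-- from typing import Any, Dict, Optional, Tuple, List
--
-- def _get_receptive_indices(out_i, out_j, x_shape, kernel_size, stride, padding) -> List[Tuple[int, int]]:
--     """Get indices of input elements that contribute to a specific output pixel"""
--     _, C, H_in, W_in = x_shape
--     receptive = []
--     for i in range(kernel_size):
--         for j in range(kernel_size):
--             in_i = out_i * stride + i - padding
--             in_j = out_j * stride + j - padding
--             if 0 <= in_i < H_in and 0 <= in_j < W_in: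
--                 receptive.append((in_i, in_j))
--     return receptive
-- ===== SOURCE B (Python) =====
-- def _get_receptive_indices(out_i, out_j, x_shape, kernel_size, stride, padding):
--     """Get indices of input elements that contribute to a specific output pixel"""
--     _, C, H_in, W_in = x_shape
--     base_i = out_i * stride - padding
--     base_j = out_j * stride - padding
--     i_lo = max(0, -base_i)
--     i_hi = min(kernel_size, H_in - base_i)
--     j_lo = max(0, -base_j)
--     j_hi = min(kernel_size, W_in - base_j)
--     return [(base_i + i, base_j + j)
--             for i in range(i_lo, i_hi)
--             for j in range(j_lo, j_hi)]
-- ===== Notes on version B (the rewrite author's own statement) =====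
-- stated objective: faster
-- what changed: Computes the valid kernel-offset ranges in closed form with max/min and emits pairs from those ranges directly, instead of scanning the full kernel_size x kernel_size grid and testing each offset against the image bounds.
import Mathlib
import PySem

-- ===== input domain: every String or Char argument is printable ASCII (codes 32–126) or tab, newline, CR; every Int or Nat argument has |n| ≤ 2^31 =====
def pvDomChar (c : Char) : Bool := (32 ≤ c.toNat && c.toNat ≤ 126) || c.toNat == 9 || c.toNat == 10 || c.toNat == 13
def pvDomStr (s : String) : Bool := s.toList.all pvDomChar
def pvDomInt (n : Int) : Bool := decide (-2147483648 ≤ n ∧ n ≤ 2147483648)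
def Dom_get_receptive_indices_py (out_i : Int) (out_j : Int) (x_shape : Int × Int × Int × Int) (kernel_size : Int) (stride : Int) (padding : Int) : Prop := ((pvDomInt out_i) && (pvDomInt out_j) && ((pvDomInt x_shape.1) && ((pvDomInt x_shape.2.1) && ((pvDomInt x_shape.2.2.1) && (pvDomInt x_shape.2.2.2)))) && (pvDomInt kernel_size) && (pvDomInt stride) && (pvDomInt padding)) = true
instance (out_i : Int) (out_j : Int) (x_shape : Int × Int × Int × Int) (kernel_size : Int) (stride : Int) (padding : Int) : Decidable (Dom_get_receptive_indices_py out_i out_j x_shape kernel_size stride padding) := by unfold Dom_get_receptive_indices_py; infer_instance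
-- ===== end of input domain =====

-- B replaces A's full k×k scan with a bounds check per cell by closed-form max/min
-- offset ranges and an unconditional emission over those ranges (same ordered output).

-- ===== PORT A =====
def get_receptive_indices_py (out_i : Int) (out_j : Int) (x_shape : Int × Int × Int × Int) (kernel_size : Int) (stride : Int) (padding : Int) : List (Int × Int) :=
  let H_in := x_shape.2.2.1
  let W_in := x_shape.2.2.2
  (PySem.List.pyRange 0 kernel_size 1).foldl (fun receptive i =>
    (PySem.List.pyRange 0 kernel_size 1).foldl (fun receptive j =>
      let in_i := out_i * stride + i - padding
      let in_j := out_j * stride + j - padding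
      if 0 ≤ in_i ∧ in_i < H_in ∧ 0 ≤ in_j ∧ in_j < W_in then
        receptive ++ [(in_i, in_j)]
      else receptive) receptive) []

-- ===== PORT B =====
def get_receptive_indices_py_alt (out_i : Int) (out_j : Int) (x_shape : Int × Int × Int × Int) (kernel_size : Int) (stride : Int) (padding : Int) : List (Int × Int) :=
  let H_in := x_shape.2.2.1
  let W_in := x_shape.2.2.2
  let base_i := out_i * stride - padding
  let base_j := out_j * stride - padding
  let i_lo := max 0 (-base_i)
  let i_hi := min kernel_size (H_in - base_i)
  let j_lo := max 0 (-base_j)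
  let j_hi := min kernel_size (W_in - base_j)
  (PySem.List.pyRange i_lo i_hi 1).flatMap (fun i =>
    (PySem.List.pyRange j_lo j_hi 1).map (fun j => (base_i + i, base_j + j)))

-- ===== PRECONDITION & SPEC =====
def Spec_get_receptive_indices_py (out_i : Int) (out_j : Int) (x_shape : Int × Int × Int × Int) (kernel_size : Int) (stride : Int) (padding : Int) (out : List (Int × Int)) : Prop := out = get_receptive_indices_py_alt out_i out_j x_shape kernel_size stride padding
instance (out_i : Int) (out_j : Int) (x_shape : Int × Int × Int × Int) (kernel_size : Int) (stride : Int) (padding : Int) (out : List (Int × Int)) : Decidable (Spec_get_receptive_indices_py out_i out_j x_shape kernel_size stride padding out) := by unfold Spec_get_receptive_indices_py; infer_instance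

-- ===== CLAIM (what is proved, stated in full; the proofs are below) =====
def Claim_equal_get_receptive_indices_py : Prop := ∀ (out_i : Int) (out_j : Int) (x_shape : Int × Int × Int × Int) (kernel_size : Int) (stride : Int) (padding : Int), Dom_get_receptive_indices_py out_i out_j x_shape kernel_size stride padding → Spec_get_receptive_indices_py out_i out_j x_shape kernel_size stride padding (get_receptive_indices_py out_i out_j x_shape kernel_size stride padding)

-- ===== LEMMAS AND PROOFS =====

-- Filtering a unit-step range by an interval test yields the clipped range.
theorem filter_pyRange_interval (lo hi : Int) : ∀ (n : Nat) (a b : Int), (b - a).toNat = n →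
    (PySem.List.pyRange a b 1).filter (fun x => decide (lo ≤ x ∧ x < hi))
      = PySem.List.pyRange (max a lo) (min b hi) 1 := by
  intro n
  induction n with
  | zero =>
    intro a b h
    rw [PySem.List.pyRange_one_eq_nil (by omega), PySem.List.pyRange_one_eq_nil (by omega)]
    rfl
  | succ m ih =>
    intro a b h
    rw [PySem.List.pyRange_one_cons (by omega), List.filter_cons, ih (a + 1) b (by omega)]
    by_cases hc : lo ≤ a ∧ a < hi
    · rw [if_pos (by simpa using hc), show max (a + 1) lo = a + 1 by omega,
          show max a lo = a by omega]
      exact (PySem.List.pyRange_one_cons (by omega)).symm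
    · rw [if_neg (by simpa using hc)]
      by_cases hlo : a < lo
      · rw [show max (a + 1) lo = max a lo by omega]
      · rw [PySem.List.pyRange_one_eq_nil (by omega), PySem.List.pyRange_one_eq_nil (by omega)]

-- flatMap with a guarded body = flatMap of the filtered list.
theorem flatMap_ite_eq_filter_flatMap {α β : Type} (p : α → Prop) [DecidablePred p]
    (g : α → List β) :
    ∀ (l : List α), l.flatMap (fun x => if p x then g x else [])
      = (l.filter (fun x => decide (p x))).flatMap g := by
  intro l
  induction l with
  | nil => rfl
  | cons x xs ih =>
    rw [List.flatMap_cons, List.filter_cons]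
    by_cases hx : p x
    · rw [if_pos hx, if_pos (by simpa using hx), List.flatMap_cons, ih]
    · rw [if_neg hx, if_neg (by simpa using hx), List.nil_append, ih]

-- Core equivalence over abstract bases: the filtered k×k scan equals the clipped ranges.
theorem receptive_master (bi bj H W k : Int) :
    (PySem.List.pyRange 0 k 1).foldl (fun acc i =>
      (PySem.List.pyRange 0 k 1).foldl (fun acc j =>
        if 0 ≤ bi + i ∧ bi + i < H ∧ 0 ≤ bj + j ∧ bj + j < W then
          acc ++ [(bi + i, bj + j)] else acc) acc) []
    = (PySem.List.pyRange (max 0 (-bi)) (min k (H - bi)) 1).flatMap (fun i =>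
        (PySem.List.pyRange (max 0 (-bj)) (min k (W - bj)) 1).map (fun j => (bi + i, bj + j))) := by
  have inner : ∀ (i : Int) (acc : List (Int × Int)),
      (PySem.List.pyRange 0 k 1).foldl (fun acc j =>
        if 0 ≤ bi + i ∧ bi + i < H ∧ 0 ≤ bj + j ∧ bj + j < W then
          acc ++ [(bi + i, bj + j)] else acc) acc
      = acc ++ (if -bi ≤ i ∧ i < H - bi then
          (PySem.List.pyRange (max 0 (-bj)) (min k (W - bj)) 1).map (fun j => (bi + i, bj + j))
        else []) := by
    intro i acc
    rw [PySem.List.foldl_append_ite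
        (p := fun j => 0 ≤ bi + i ∧ bi + i < H ∧ 0 ≤ bj + j ∧ bj + j < W)
        (f := fun j => (bi + i, bj + j))]
    congr 1
    by_cases hi : -bi ≤ i ∧ i < H - bi
    · rw [if_pos hi]
      have hq : ∀ j ∈ PySem.List.pyRange 0 k 1,
          decide (0 ≤ bi + i ∧ bi + i < H ∧ 0 ≤ bj + j ∧ bj + j < W)
            = decide (-bj ≤ j ∧ j < W - bj) := by
        intro j _
        obtain ⟨h1, h2⟩ := hi
        apply decide_eq_decide.mpr
        omega
      rw [List.filter_congr hq,
          filter_pyRange_interval (-bj) (W - bj) (k - 0).toNat 0 k rfl]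
    · rw [if_neg hi,
          List.filter_eq_nil_iff.mpr (fun j _ => by simp only [decide_eq_true_eq]; omega)]
      rfl
  have hf : (fun (acc : List (Int × Int)) (i : Int) =>
      (PySem.List.pyRange 0 k 1).foldl (fun acc j =>
        if 0 ≤ bi + i ∧ bi + i < H ∧ 0 ≤ bj + j ∧ bj + j < W then
          acc ++ [(bi + i, bj + j)] else acc) acc)
      = (fun acc i => acc ++ (if -bi ≤ i ∧ i < H - bi then
          (PySem.List.pyRange (max 0 (-bj)) (min k (W - bj)) 1).map (fun j => (bi + i, bj + j))
        else [])) := by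
    funext acc i
    exact inner i acc
  rw [hf, PySem.List.foldl_append_eq_flatMap, List.nil_append,
      flatMap_ite_eq_filter_flatMap (fun i => -bi ≤ i ∧ i < H - bi),
      filter_pyRange_interval (-bi) (H - bi) (k - 0).toNat 0 k rfl]

-- ===== VERDICT (by name: the statement is the Claim_ definition above) =====
theorem get_receptive_indices_py_spec : Claim_equal_get_receptive_indices_py := by
  intro out_i out_j x_shape kernel_size stride padding _
  unfold Spec_get_receptive_indices_py
  simp only [get_receptive_indices_py, get_receptive_indices_py_alt]
  have hA : (fun (acc : List (Int × Int)) (i : Int) =>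
      (PySem.List.pyRange 0 kernel_size 1).foldl (fun acc j =>
        if 0 ≤ out_i * stride + i - padding ∧ out_i * stride + i - padding < x_shape.2.2.1 ∧
           0 ≤ out_j * stride + j - padding ∧ out_j * stride + j - padding < x_shape.2.2.2 then
          acc ++ [(out_i * stride + i - padding, out_j * stride + j - padding)] else acc) acc)
      = (fun acc i =>
      (PySem.List.pyRange 0 kernel_size 1).foldl (fun acc j =>
        if 0 ≤ (out_i * stride - padding) + i ∧ (out_i * stride - padding) + i < x_shape.2.2.1 ∧
           0 ≤ (out_j * stride - padding) + j ∧ (out_j * stride - padding) + j < x_shape.2.2.2 then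
          acc ++ [((out_i * stride - padding) + i, (out_j * stride - padding) + j)] else acc) acc) := by
    funext acc i
    have hfj : (fun (acc : List (Int × Int)) (j : Int) =>
        if 0 ≤ out_i * stride + i - padding ∧ out_i * stride + i - padding < x_shape.2.2.1 ∧
           0 ≤ out_j * stride + j - padding ∧ out_j * stride + j - padding < x_shape.2.2.2 then
          acc ++ [(out_i * stride + i - padding, out_j * stride + j - padding)] else acc)
        = (fun acc j =>
        if 0 ≤ (out_i * stride - padding) + i ∧ (out_i * stride - padding) + i < x_shape.2.2.1 ∧
           0 ≤ (out_j * stride - padding) + j ∧ (out_j * stride - padding) + j < x_shape.2.2.2 then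
          acc ++ [((out_i * stride - padding) + i, (out_j * stride - padding) + j)] else acc) := by
      funext acc j
      rw [show out_i * stride + i - padding = (out_i * stride - padding) + i from by ring,
          show out_j * stride + j - padding = (out_j * stride - padding) + j from by ring]
    rw [hfj]
  rw [hA]
  exact receptive_master (out_i * stride - padding) (out_j * stride - padding)
    x_shape.2.2.1 x_shape.2.2.2 kernel_size
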